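-- pv_equiv track=rewrite | github.com/jasonvassallo/ai-orchestrator | src/orchestrator.py | _split_system_messages
-- ===== SOURCE A (Python) =====
-- from typing import TYPE_CHECKING, Any, cast
--
-- def _split_system_messages(
--     messages: list[dict[str, Any]],
-- ) -> tuple[str | None, list[dict[str, Any]]]:
--     system_message = None
--     input_messages: list[dict[str, Any]] = []
--     for msg in messages:
--         if msg.get("role") == "system" and system_message is None:
--             system_message = msg.get("content", "")
--             continue
--         if msg.get("role") == "system":
--             continue
--         input_messages.append(msg)
--     return system_message, input_messages
-- ===== SOURCE B (Python) =====
-- def _split_system_messages(messages):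
--     system_message = None
--     for msg in messages:
--         if msg.get("role") == "system":
--             system_message = msg.get("content", "")
--             break
--     input_messages = [m for m in messages if m.get("role") != "system"]
--     return system_message, input_messages
-- ===== Notes on version B (the rewrite author's own statement) =====
-- stated objective: simpler
-- what changed: Replaces the single fused loop with stateful branching by two independent passes: a short search that takes the first system message's content and breaks, and a comprehension filtering out all system messages.
import Mathlib
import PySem

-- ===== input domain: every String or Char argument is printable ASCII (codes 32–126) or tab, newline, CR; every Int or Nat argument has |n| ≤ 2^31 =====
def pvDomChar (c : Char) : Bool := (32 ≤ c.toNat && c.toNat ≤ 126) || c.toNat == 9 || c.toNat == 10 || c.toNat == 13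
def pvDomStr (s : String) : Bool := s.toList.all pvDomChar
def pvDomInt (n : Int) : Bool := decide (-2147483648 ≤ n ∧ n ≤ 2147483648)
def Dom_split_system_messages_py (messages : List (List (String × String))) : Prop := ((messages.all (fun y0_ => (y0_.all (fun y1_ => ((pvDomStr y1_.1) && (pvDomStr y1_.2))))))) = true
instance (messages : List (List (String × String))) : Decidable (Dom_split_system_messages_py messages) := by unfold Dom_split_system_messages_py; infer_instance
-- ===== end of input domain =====

-- B splits A's fused stateful loop into two independent passes (find first system content; filter out all system messages): simpler decomposition, same results.


-- ===== PORT A =====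
-- A's single loop, carried state (system_message, input_messages), transliterated as structural recursion
def splitSysGoA (sm : Option String) (acc : List (List (String × String))) :
    List (List (String × String)) → Option String × (List (List (String × String)))
  | [] => (sm, acc)
  | msg :: rest =>
    if PySem.Dict.get? (PySem.Dict.mk msg) "role" = some "system" ∧ sm = none then
      splitSysGoA (some (PySem.Dict.getD (PySem.Dict.mk msg) "content" "")) acc rest
    else if PySem.Dict.get? (PySem.Dict.mk msg) "role" = some "system" then
      splitSysGoA sm acc rest
    else
      splitSysGoA sm (acc ++ [msg]) rest

def split_system_messages_py (messages : List (List (String × String))) : Option String × (List (List (String × String))) :=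
  splitSysGoA none [] messages

-- ===== PORT B =====
-- B's first pass: break at the first message with role == "system", returning its content (default "")
def splitSysFind : List (List (String × String)) → Option String
  | [] => none
  | msg :: rest =>
    if PySem.Dict.get? (PySem.Dict.mk msg) "role" = some "system" then some (PySem.Dict.getD (PySem.Dict.mk msg) "content" "")
    else splitSysFind rest

def split_system_messages_py_alt (messages : List (List (String × String))) : Option String × (List (List (String × String))) :=
  (splitSysFind messages,
   messages.filter (fun m => !(PySem.Dict.get? (PySem.Dict.mk m) "role" == some "system")))

-- ===== PRECONDITION & SPEC =====
def Spec_split_system_messages_py (messages : List (List (String × String))) (out : Option String × (List (List (String × String)))) : Prop := out = split_system_messages_py_alt messages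
instance (messages : List (List (String × String))) (out : Option String × (List (List (String × String)))) : Decidable (Spec_split_system_messages_py messages out) := by unfold Spec_split_system_messages_py; infer_instance

-- ===== CLAIM (what is proved, stated in full; the proofs are below) =====
def Claim_equal_split_system_messages_py : Prop := ∀ (messages : List (List (String × String))), Dom_split_system_messages_py messages → Spec_split_system_messages_py messages (split_system_messages_py messages)

-- ===== LEMMAS AND PROOFS =====

-- once a system message is found, A only filters the rest
theorem splitSysGoA_some (s : String) (acc : List (List (String × String)))
    (msgs : List (List (String × String))) :
    splitSysGoA (some s) acc msgs =
      (some s, acc ++ msgs.filter (fun m => !(PySem.Dict.get? (PySem.Dict.mk m) "role" == some "system"))) := by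
  induction msgs generalizing acc with
  | nil => simp [splitSysGoA]
  | cons msg rest ih =>
    simp only [splitSysGoA, List.filter_cons]
    by_cases h : PySem.Dict.get? (PySem.Dict.mk msg) "role" = some "system"
    · simp [h, ih]
    · simp [h, ih]

-- before a system message is found, A's state agrees with B's two passes
theorem splitSysGoA_none (acc : List (List (String × String)))
    (msgs : List (List (String × String))) :
    splitSysGoA none acc msgs =
      (splitSysFind msgs, acc ++ msgs.filter (fun m => !(PySem.Dict.get? (PySem.Dict.mk m) "role" == some "system"))) := by
  induction msgs generalizing acc with
  | nil => simp [splitSysGoA, splitSysFind]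
  | cons msg rest ih =>
    simp only [splitSysGoA, splitSysFind, List.filter_cons]
    by_cases h : PySem.Dict.get? (PySem.Dict.mk msg) "role" = some "system"
    · simp [h, splitSysGoA_some]
    · simp [h, ih]

-- ===== VERDICT (by name: the statement is the Claim_ definition above) =====
theorem split_system_messages_py_spec : Claim_equal_split_system_messages_py := by
  intro messages _
  unfold Spec_split_system_messages_py split_system_messages_py split_system_messages_py_alt
  simp [splitSysGoA_none]
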